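-- pv_equiv track=rewrite | github.com/ivorygrant/python-challenge | PyBank/main.py | GreatestDec
-- ===== SOURCE A (Python) =====
-- def GreatestDec(array):
--     gDec = 0
--     gDecMonth = ""
--     for each in array:
--         if each[1] < gDec:
--             gDec = each[1]
--             gDecMonth = each[0]
--
--     return str(gDec) + ' ' + gDecMonth
-- ===== SOURCE B (Python) =====
-- def GreatestDec(array):
--     s = sorted(array, key=lambda e: e[1])
--     if s and s[0][1] < 0:
--         return str(s[0][1]) + ' ' + s[0][0]
--     return '0 '
-- ===== Notes on version B (the rewrite author's own statement) =====
-- stated objective: alternative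
-- what changed: B replaces A's running-minimum accumulator loop with a stable sort by value followed by selecting the head element (kept only if negative), so the scan-with-state disappears.
import Mathlib
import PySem

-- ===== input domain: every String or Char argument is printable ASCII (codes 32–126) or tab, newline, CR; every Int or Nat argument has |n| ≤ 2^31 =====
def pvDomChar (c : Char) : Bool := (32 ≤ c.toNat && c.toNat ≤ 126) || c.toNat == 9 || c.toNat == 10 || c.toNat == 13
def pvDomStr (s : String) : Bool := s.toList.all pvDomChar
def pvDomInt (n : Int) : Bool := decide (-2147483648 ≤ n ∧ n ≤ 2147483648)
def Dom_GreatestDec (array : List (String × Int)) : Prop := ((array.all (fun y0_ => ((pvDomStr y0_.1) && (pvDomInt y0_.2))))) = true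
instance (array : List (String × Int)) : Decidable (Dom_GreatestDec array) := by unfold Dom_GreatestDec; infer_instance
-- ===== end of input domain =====

-- B replaces A's running-minimum accumulator loop with a stable sort by value and a head
-- selection (objective: alternative decomposition, same result, not claimed faster).

-- ===== PORT A =====
-- A: running-minimum scan with state (gDec, gDecMonth), strict '<' against gDec initialised to 0.
def GreatestDec (array : List (String × Int)) : String :=
  let st := array.foldl
    (fun st each => if each.2 < st.1 then (each.2, each.1) else st)
    ((0 : Int), "")
  PySem.Int.toStr st.1 ++ " " ++ st.2

-- ===== PORT B =====
-- B: stable ascending sort by the value component, then the head (kept only if negative).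
def GreatestDec_alt (array : List (String × Int)) : String :=
  match PySem.List.sorted array (fun e => e.2) false with
  | [] => "0 "
  | m :: _ => if m.2 < 0 then PySem.Int.toStr m.2 ++ " " ++ m.1 else "0 "

-- ===== PRECONDITION & SPEC =====
def Spec_GreatestDec (array : List (String × Int)) (out : String) : Prop := out = GreatestDec_alt array
instance (array : List (String × Int)) (out : String) : Decidable (Spec_GreatestDec array out) := by unfold Spec_GreatestDec; infer_instance

-- ===== CLAIM (what is proved, stated in full; the proofs are below) =====
def Claim_equal_GreatestDec : Prop := ∀ (array : List (String × Int)), Dom_GreatestDec array → Spec_GreatestDec array (GreatestDec array)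

-- ===== LEMMAS AND PROOFS =====

-- running minimum (first occurrence wins, strict '<') over pairs, keyed on the value
def runMin (t : List (String × Int)) (a : String × Int) : String × Int :=
  t.foldl (fun m x => if x.2 < m.2 then x else m) a

-- head of the stable insertion sort's fold equals the running minimum
theorem head_foldl_insertBy (t : List (String × Int)) :
    ∀ (acc : List (String × Int)) (m : String × Int), acc.head? = some m →
      (t.foldl (fun acc x => PySem.List.insertBy (fun a b => decide (a.2 < b.2)) x acc) acc).head?
        = some (runMin t m) := by
  induction t with
  | nil => intro acc m h; simpa [runMin] using h
  | cons x t ih =>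
    intro acc m h
    cases acc with
    | nil => simp at h
    | cons y ys =>
      obtain rfl : y = m := by simpa using h
      simp only [List.foldl_cons, runMin, PySem.List.insertBy]
      by_cases hx : x.2 < y.2
      · have := ih (x :: y :: ys) x (by simp)
        simpa [runMin, hx] using this
      · have := ih (y :: PySem.List.insertBy (fun a b => decide (a.2 < b.2)) x ys) y (by simp)
        simpa [runMin, hx] using this

theorem head_sorted (h : String × Int) (t : List (String × Int)) :
    (PySem.List.sorted (h :: t) (fun e => e.2) false).head? = some (runMin t h) := by
  rw [PySem.List.sorted_eq_foldl_insertBy]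
  simpa [PySem.List.insertBy] using
    head_foldl_insertBy t [h] h rfl

-- pushing the 0-threshold through the running minimum
theorem runMin_zero (t : List (String × Int)) :
    ∀ (a : String × Int),
      runMin t (if a.2 < 0 then a else ("", 0)) =
        (if (runMin t a).2 < 0 then runMin t a else ("", 0)) := by
  induction t with
  | nil => intro a; simp [runMin]
  | cons x t ih =>
    intro a
    have key : (if x.2 < (if a.2 < 0 then a else (("", 0) : String × Int)).2
        then x else (if a.2 < 0 then a else ("", 0)))
        = (if (if x.2 < a.2 then x else a).2 < 0 then (if x.2 < a.2 then x else a) else ("", 0)) := by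
      by_cases ha : a.2 < 0 <;> by_cases hx : x.2 < a.2 <;> by_cases hx0 : x.2 < 0 <;>
        simp [ha, hx, hx0] <;> omega
    simp only [runMin, List.foldl_cons] at *
    rw [key] at *
    exact ih (if x.2 < a.2 then x else a)

-- A's fold is the running minimum with swapped components, started from ("", 0)
theorem A_fold_eq (t : List (String × Int)) :
    ∀ (g : Int) (mo : String),
      t.foldl (fun st each => if each.2 < st.1 then (each.2, each.1) else st) (g, mo)
        = ((runMin t (mo, g)).2, (runMin t (mo, g)).1) := by
  induction t with
  | nil => intro g mo; simp [runMin]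
  | cons x t ih =>
    intro g mo
    simp only [runMin, List.foldl_cons]
    by_cases hx : x.2 < g <;> simpa [runMin, hx] using ih _ _

-- ===== VERDICT (by name: the statement is the Claim_ definition above) =====
theorem GreatestDec_spec : Claim_equal_GreatestDec := by
  intro array _
  unfold Spec_GreatestDec GreatestDec GreatestDec_alt
  cases array with
  | nil => rfl
  | cons h t =>
    have hs := head_sorted h t
    cases hsort : PySem.List.sorted (h :: t) (fun e => e.2) false with
    | nil => exact absurd hsort (by simp [PySem.List.sorted_eq_nil_iff])
    | cons m rest =>
      rw [hsort] at hs
      obtain rfl : m = runMin t h := by simpa using hs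
      have hA : (h :: t).foldl
          (fun st each => if each.2 < st.1 then (each.2, each.1) else st) ((0 : Int), "")
          = ((runMin t (if h.2 < 0 then h else ("", 0))).2,
             (runMin t (if h.2 < 0 then h else ("", 0))).1) := by
        have := A_fold_eq t
        by_cases hh : h.2 < 0 <;> simp [hh, A_fold_eq]
      rw [runMin_zero] at hA
      by_cases hm : (runMin t h).2 < 0
      · simp [hA, hm]
      · simp [hA, hm]
        rfl
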